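-- pv_equiv track=rewrite | github.com/Ozurexus/AI_Homework | Piniagin.py | generate_major_scale
-- ===== SOURCE A (Python) =====
-- NotesList = ["C", "C#", "D", "D#", "E", "F", "F#",
--              "G", "G#", "A", "A#", "B"]  # list of all notes
--
-- def generate_major_scale(note: str) -> list:
--     major_scale = []
--     for i in range(len(NotesList)):
--         if note == NotesList[i]:
--             major_number = [i, i + 2, i + 4, i + 5, i + 7, i + 9, i + 11]
--             major_scale = [NotesList[i % 12] for i in major_number]
--             break
--     return major_scale
-- ===== SOURCE B (Python) =====
-- NotesList = ["C", "C#", "D", "D#", "E", "F", "F#",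
--              "G", "G#", "A", "A#", "B"]  # list of all notes
--
-- def generate_major_scale(note: str) -> list:
--     # Circle-of-fifths construction: the major scale is the seven consecutive
--     # perfect fifths starting from the subdominant (root + 5 semitones),
--     # re-sorted into ascending order within the octave above the root.
--     if note not in NotesList:
--         return []
--     i = NotesList.index(note)
--     fifths = [(i + 5 + 7 * k) % 12 for k in range(7)]
--     fifths.sort(key=lambda p: (p - i) % 12)
--     return [NotesList[p] for p in fifths]
-- ===== Notes on version B (the rewrite author's own statement) =====
-- stated objective: alternative
-- what changed: B derives the scale from the circle of fifths (seven consecutive fifths starting at the subdominant, taken mod 12) and then sorts those pitch classes by their interval above the root, instead of A's scan that maps a precomputed absolute-offset list.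
import Mathlib
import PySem

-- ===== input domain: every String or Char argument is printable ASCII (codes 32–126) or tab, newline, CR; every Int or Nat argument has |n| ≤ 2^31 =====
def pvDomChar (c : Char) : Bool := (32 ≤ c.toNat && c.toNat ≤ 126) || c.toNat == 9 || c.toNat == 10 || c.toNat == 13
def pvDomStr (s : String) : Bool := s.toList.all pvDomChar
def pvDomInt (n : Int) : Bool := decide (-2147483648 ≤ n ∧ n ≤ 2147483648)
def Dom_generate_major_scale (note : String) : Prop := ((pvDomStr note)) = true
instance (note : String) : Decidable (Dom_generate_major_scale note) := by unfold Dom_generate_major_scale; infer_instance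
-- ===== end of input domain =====

-- B derives the scale from the circle of fifths (seven consecutive fifths from the
-- subdominant, mod 12) sorted by interval above the root; alternative algorithm, same cost.

-- ===== PORT A =====
def NotesListA : List String :=
  ["C", "C#", "D", "D#", "E", "F", "F#", "G", "G#", "A", "A#", "B"]

-- the 'for i in range(len(NotesList))' loop with its break: recursion over the range list
def gmsLoop (note : String) : List Int → List String
  | [] => []
  | i :: rest =>
    if note == PySem.List.pyGetD NotesListA i "" then
      -- indices here are always in range, so pyGetD is exact
      let major_number : List Int := [i, i + 2, i + 4, i + 5, i + 7, i + 9, i + 11]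
      major_number.map (fun j => PySem.List.pyGetD NotesListA (PySem.Int.mod j 12) "")
    else gmsLoop note rest

def generate_major_scale (note : String) : List String :=
  gmsLoop note (PySem.List.pyRange 0 (NotesListA.length) 1)

-- ===== PORT B =====
def NotesListB : List String :=
  ["C", "C#", "D", "D#", "E", "F", "F#", "G", "G#", "A", "A#", "B"]

def generate_major_scale_alt (note : String) : List String :=
  if NotesListB.contains note then
    match PySem.List.index? NotesListB note with
    | none => []   -- unreachable after the membership check
    | some idx =>
      let i : Int := idx
      let fifths : List Int :=
        (PySem.List.pyRange 0 7 1).map (fun k => PySem.Int.mod (i + 5 + 7 * k) 12)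
      let sortedFifths := PySem.List.sorted fifths (fun p => PySem.Int.mod (p - i) 12) false
      sortedFifths.map (fun p => PySem.List.pyGetD NotesListB p "")
  else []

-- ===== PRECONDITION & SPEC =====
def Spec_generate_major_scale (note : String) (out : List String) : Prop := out = generate_major_scale_alt note
instance (note : String) (out : List String) : Decidable (Spec_generate_major_scale note out) := by unfold Spec_generate_major_scale; infer_instance

-- ===== CLAIM =====
def Claim_equal_generate_major_scale : Prop := ∀ (note : String), Dom_generate_major_scale note → Spec_generate_major_scale note (generate_major_scale note)

-- ===== LEMMAS AND PROOFS =====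
theorem range12 : PySem.List.pyRange 0 (NotesListA.length) 1 = [0,1,2,3,4,5,6,7,8,9,10,11] := by decide

-- ===== VERDICT =====
theorem generate_major_scale_spec : Claim_equal_generate_major_scale := by
  intro note _
  unfold Spec_generate_major_scale
  by_cases h : note ∈ NotesListA
  · simp only [NotesListA, List.mem_cons, List.not_mem_nil, or_false] at h
    rcases h with h|h|h|h|h|h|h|h|h|h|h|h <;> subst h <;> decide
  · simp only [NotesListA, List.mem_cons, List.not_mem_nil, or_false, not_or] at h
    obtain ⟨h1,h2,h3,h4,h5,h6,h7,h8,h9,h10,h11,h12⟩ := h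
    have hA : generate_major_scale note = [] := by
      rw [generate_major_scale, range12]
      simp only [gmsLoop]
      have e0 : PySem.List.pyGetD NotesListA (0:Int) "" = "C" := by decide
      have e1 : PySem.List.pyGetD NotesListA (1:Int) "" = "C#" := by decide
      have e2 : PySem.List.pyGetD NotesListA (2:Int) "" = "D" := by decide
      have e3 : PySem.List.pyGetD NotesListA (3:Int) "" = "D#" := by decide
      have e4 : PySem.List.pyGetD NotesListA (4:Int) "" = "E" := by decide
      have e5 : PySem.List.pyGetD NotesListA (5:Int) "" = "F" := by decide
      have e6 : PySem.List.pyGetD NotesListA (6:Int) "" = "F#" := by decide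
      have e7 : PySem.List.pyGetD NotesListA (7:Int) "" = "G" := by decide
      have e8 : PySem.List.pyGetD NotesListA (8:Int) "" = "G#" := by decide
      have e9 : PySem.List.pyGetD NotesListA (9:Int) "" = "A" := by decide
      have e10 : PySem.List.pyGetD NotesListA (10:Int) "" = "A#" := by decide
      have e11 : PySem.List.pyGetD NotesListA (11:Int) "" = "B" := by decide
      rw [e0,e1,e2,e3,e4,e5,e6,e7,e8,e9,e10,e11]
      simp [h1,h2,h3,h4,h5,h6,h7,h8,h9,h10,h11,h12]
    have hB : generate_major_scale_alt note = [] := by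
      have hc : ¬ note ∈ NotesListB := by
        simp [NotesListB, h1,h2,h3,h4,h5,h6,h7,h8,h9,h10,h11,h12]
      simp [generate_major_scale_alt, hc]
    rw [hA, hB]
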